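-- pv_equiv track=rewrite | github.com/jakobkhansen/KattisSolutions | guessthedatastructure/guessthedatastructure.py | check_queue
-- ===== SOURCE A (Python) =====
-- def check_queue(operations):
--     queue = []
--     for op in operations:
--         t,v = op
--
--         if t == 1:
--             queue.append(v)
--         if t == 2:
--             try:
--                 out = queue.pop(0)
--                 if out != v:
--                     return False
--             except:
--                 return False
--     return True
-- ===== SOURCE B (Python) =====
-- def check_queue(operations):
--     enqueued = [v for t, v in operations if t == 1]
--     seen = 0
--     deq = 0
--     for t, v in operations:
--         if t == 1:
--             seen += 1
--         elif t == 2: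
--             if deq >= seen or enqueued[deq] != v:
--                 return False
--             deq += 1
--     return True
-- ===== Notes on version B (the rewrite author's own statement) =====
-- stated objective: alternative
-- what changed: B precomputes the ordered list of enqueued values and replays dequeues with an integer pointer plus an enqueues-seen counter, instead of simulating a mutating queue with pop(0).
import Mathlib
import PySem

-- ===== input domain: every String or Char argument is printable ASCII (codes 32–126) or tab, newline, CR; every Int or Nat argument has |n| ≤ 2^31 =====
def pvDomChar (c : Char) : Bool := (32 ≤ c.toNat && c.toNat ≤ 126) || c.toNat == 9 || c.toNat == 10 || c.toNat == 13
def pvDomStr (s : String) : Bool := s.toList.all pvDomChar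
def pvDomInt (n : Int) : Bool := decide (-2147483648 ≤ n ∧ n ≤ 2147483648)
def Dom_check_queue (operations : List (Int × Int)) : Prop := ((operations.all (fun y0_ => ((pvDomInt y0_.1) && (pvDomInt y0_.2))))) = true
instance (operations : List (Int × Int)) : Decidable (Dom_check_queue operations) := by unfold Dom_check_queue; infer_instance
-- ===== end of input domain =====

-- B replaces A's mutating-queue simulation (pop(0)) by a precomputed enqueue list replayed
-- with an integer dequeue pointer and an enqueues-seen counter (alternative decomposition).

-- ===== PORT A =====
-- A's loop: queue grows by append on t==1; on t==2, pop(0) (except → False), compare.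
def check_queue_go (queue : List Int) : List (Int × Int) → Bool
  | [] => true
  | (t, v) :: rest =>
    let queue := if t == 1 then queue ++ [v] else queue
    if t == 2 then
      match queue with
      | [] => false                                  -- pop(0) raises, caught: return False
      | out :: q' => if out != v then false else check_queue_go q' rest
    else check_queue_go queue rest

def check_queue (operations : List (Int × Int)) : Bool :=
  check_queue_go [] operations

-- ===== PORT B =====
def check_queue_alt_go (enqueued : List Int) (seen deq : Nat) : List (Int × Int) → Bool
  | [] => true
  | (t, v) :: rest =>
    if t == 1 then check_queue_alt_go enqueued (seen + 1) deq rest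
    else if t == 2 then
      if deq ≥ seen || enqueued.getD deq 0 != v then false
      else check_queue_alt_go enqueued seen (deq + 1) rest
    else check_queue_alt_go enqueued seen deq rest

def check_queue_alt (operations : List (Int × Int)) : Bool :=
  let enqueued := operations.filterMap (fun p => if p.1 == 1 then some p.2 else none)
  check_queue_alt_go enqueued 0 0 operations

-- ===== PRECONDITION & SPEC =====
def Spec_check_queue (operations : List (Int × Int)) (out : Bool) : Prop := out = check_queue_alt operations
instance (operations : List (Int × Int)) (out : Bool) : Decidable (Spec_check_queue operations out) := by unfold Spec_check_queue; infer_instance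

-- ===== CLAIM (what is proved, stated in full; the proofs are below) =====
def Claim_equal_check_queue : Prop := ∀ (operations : List (Int × Int)), Dom_check_queue operations → Spec_check_queue operations (check_queue operations)

-- ===== LEMMAS AND PROOFS =====

-- Invariant: with `pre` the enqueues already seen (seen = pre.length) and `deq` dequeues done,
-- A's queue is pre.drop deq and B's enqueued list is pre ++ (future enqueues of rest).
theorem check_queue_invariant (rest : List (Int × Int)) :
    ∀ (pre : List Int) (deq : Nat), deq ≤ pre.length →
      check_queue_go (pre.drop deq) rest =
        check_queue_alt_go (pre ++ rest.filterMap (fun p => if p.1 == 1 then some p.2 else none))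
          pre.length deq rest := by
  induction rest with
  | nil => intro pre deq _; simp [check_queue_go, check_queue_alt_go]
  | cons op rest ih =>
    intro pre deq hdeq
    obtain ⟨t, v⟩ := op
    by_cases h1 : t = 1
    · subst h1
      simp only [check_queue_go, check_queue_alt_go, List.filterMap_cons]
      norm_num
      have h2 : (1 : Int) ≠ 2 := by norm_num
      have := ih (pre ++ [v]) deq (by simp; omega)
      simp only [List.length_append, List.length_cons, List.length_nil] at this
      rw [List.drop_append_of_le_length hdeq] at this
      simpa using this
    · by_cases h2 : t = 2
      · subst h2
        simp only [check_queue_go, check_queue_alt_go]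
        norm_num
        by_cases hemp : deq ≥ pre.length
        · have : deq = pre.length := le_antisymm hdeq hemp
          subst this
          simp
        · push_neg at hemp
          have hd : pre.drop deq = pre[deq] :: pre.drop (deq + 1) :=
            List.drop_eq_getElem_cons hemp
          rw [hd]
          simp only [List.getElem?_append_left hemp,
            List.getElem?_eq_getElem hemp, Option.getD_some, not_le.mpr hemp]
          by_cases hv : pre[deq] = v
          · simp [hv, ih pre (deq + 1) hemp]
          · simp [hv]
      · simp only [check_queue_go, check_queue_alt_go]
        simp [h1, h2, ih pre deq hdeq]

-- ===== VERDICT (by name: the statement is the Claim_ definition above) =====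
theorem check_queue_spec : Claim_equal_check_queue := by
  intro operations _
  unfold Spec_check_queue check_queue check_queue_alt
  simpa using check_queue_invariant operations [] 0 (by simp)
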